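-- pv_equiv track=rewrite | github.com/krishnabansal89/LazyEditor | image_to_video.py | remove_items
-- ===== SOURCE A (Python) =====
-- def remove_items(list_ , item):
--     new_list = []
--     removed = False
--     for i in list_:
--         if i == item and removed == False:
--             new_list.append(-1)
--             removed = True
--         else:
--             new_list.append(i)
--     return new_list
-- ===== SOURCE B (Python) =====
-- def remove_items(list_, item):
--     new_list = list(list_)
--     try:
--         new_list[new_list.index(item)] = -1
--     except ValueError:
--         pass
--     return new_list
-- ===== Notes on version B (the rewrite author's own statement) =====
-- stated objective: idiomatic
-- what changed: Replaces A's flag-guarded element-by-element rebuild loop with copy, index() lookup of the first occurrence, and a single positional assignment (ValueError when absent).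
import Mathlib
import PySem

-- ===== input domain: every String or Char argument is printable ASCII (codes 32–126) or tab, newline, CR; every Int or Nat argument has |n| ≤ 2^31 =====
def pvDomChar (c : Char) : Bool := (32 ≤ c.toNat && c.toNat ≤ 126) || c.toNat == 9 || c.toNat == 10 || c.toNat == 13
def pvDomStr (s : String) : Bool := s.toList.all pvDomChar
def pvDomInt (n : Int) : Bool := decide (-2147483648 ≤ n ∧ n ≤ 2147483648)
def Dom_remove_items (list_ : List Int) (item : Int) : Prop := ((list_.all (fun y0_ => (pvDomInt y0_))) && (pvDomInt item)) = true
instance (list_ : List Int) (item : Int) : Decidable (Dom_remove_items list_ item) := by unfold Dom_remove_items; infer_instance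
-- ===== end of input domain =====

-- B replaces A's flag-guarded rebuild loop with copy + index? lookup + single positional write (idiomatic; same O(n) cost).

-- ===== PORT A =====
-- the for-loop with its `removed` flag, building new_list front to back
def removeItemsGo (list_ : List Int) (item : Int) (removed : Bool) : List Int :=
  match list_ with
  | [] => []
  | i :: rest =>
    if i == item && removed == false then
      (-1) :: removeItemsGo rest item true
    else
      i :: removeItemsGo rest item removed

def remove_items (list_ : List Int) (item : Int) : List Int :=
  removeItemsGo list_ item false

-- ===== PORT B =====
-- copy, locate first occurrence (list.index → PySem.List.index?), assign -1 there; absent → unchanged copy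
def remove_items_alt (list_ : List Int) (item : Int) : List Int :=
  match PySem.List.index? list_ item with
  | some k => list_.set k (-1)
  | none => list_

-- ===== PRECONDITION & SPEC =====
def Spec_remove_items (list_ : List Int) (item : Int) (out : List Int) : Prop := out = remove_items_alt list_ item
instance (list_ : List Int) (item : Int) (out : List Int) : Decidable (Spec_remove_items list_ item out) := by unfold Spec_remove_items; infer_instance

-- ===== CLAIM (what is proved, stated in full; the proofs are below) =====
def Claim_equal_remove_items : Prop := ∀ (list_ : List Int) (item : Int), Dom_remove_items list_ item → Spec_remove_items list_ item (remove_items list_ item)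

-- ===== LEMMAS AND PROOFS =====
theorem removeItemsGo_true (list_ : List Int) (item : Int) :
    removeItemsGo list_ item true = list_ := by
  induction list_ with
  | nil => rfl
  | cons i rest ih => simp [removeItemsGo, ih]

theorem removeItemsGo_false (list_ : List Int) (item : Int) :
    removeItemsGo list_ item false = remove_items_alt list_ item := by
  induction list_ with
  | nil => rfl
  | cons i rest ih =>
    by_cases h : i = item
    · subst h
      simp only [remove_items_alt, PySem.List.index?_cons_self]
      simp [removeItemsGo, removeItemsGo_true]
    · have hne : (i == item) = false := by simp [h]
      simp only [removeItemsGo, hne, Bool.false_and, if_neg,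
        Bool.false_eq_true, not_false_eq_true, ih]
      unfold remove_items_alt
      rw [PySem.List.index?_cons_of_ne rest h]
      cases hk : PySem.List.index? rest item with
      | none => simp
      | some k => simp [List.set]

-- ===== VERDICT (by name: the statement is the Claim_ definition above) =====
theorem remove_items_spec : Claim_equal_remove_items := by
  intro list_ item _
  unfold Spec_remove_items remove_items
  exact removeItemsGo_false list_ item
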